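-- pv_equiv track=rewrite | github.com/qiqi-impact/cp | leetcode-contest/biweekly-93/2.py | maxStarSum
-- ===== SOURCE A (Python) =====
-- from typing import List
--
-- def maxStarSum(vals: List[int], edges: List[List[int]], k: int) -> int:
--     N = len(vals)
--     g = [[] for _ in range(N)]
--
--     for x, y in edges:
--         g[x].append(y)
--         g[y].append(x)
--
--     ss = list(range(N))
--     ss.sort(key=lambda x:-vals[x])
--
--     ct = [0] * N
--     sums =vals[:]
--     ret = max(vals)
--     for idx in ss:
--         if vals[idx] <= 0: break
--         for ch in g[idx]:
--             if ct[ch] < k: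
--                 sums[ch] += vals[idx]
--                 ct[ch] += 1
--                 ret = max(ret, sums[ch])
--     return ret
-- ===== SOURCE B (Python) =====
-- from typing import List
--
-- def maxStarSum(vals: List[int], edges: List[List[int]], k: int) -> int:
--     n = len(vals)
--     g = [[] for _ in range(n)]
--     for x, y in edges:
--         g[x].append(vals[y])
--         g[y].append(vals[x])
--     best = max(vals)
--     for i in range(n):
--         s = vals[i]
--         for v in sorted(g[i], reverse=True)[:max(k, 0)]:
--             if v <= 0:
--                 break
--             s += v
--         best = max(best, s)
--     return best
-- ===== Notes on version B (the rewrite author's own statement) =====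
-- stated objective: idiomatic
-- what changed: B computes each center's star sum independently (sort that node's neighbor values descending, add the positive ones among the first k) instead of A's global sweep over all nodes sorted by value with shared counter/partial-sum arrays updated across centers.
-- outside the precondition, e.g. on maxStarSum([1, 2], [[-1, 0]], 1): A returns 3, B returns 3
import Mathlib
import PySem

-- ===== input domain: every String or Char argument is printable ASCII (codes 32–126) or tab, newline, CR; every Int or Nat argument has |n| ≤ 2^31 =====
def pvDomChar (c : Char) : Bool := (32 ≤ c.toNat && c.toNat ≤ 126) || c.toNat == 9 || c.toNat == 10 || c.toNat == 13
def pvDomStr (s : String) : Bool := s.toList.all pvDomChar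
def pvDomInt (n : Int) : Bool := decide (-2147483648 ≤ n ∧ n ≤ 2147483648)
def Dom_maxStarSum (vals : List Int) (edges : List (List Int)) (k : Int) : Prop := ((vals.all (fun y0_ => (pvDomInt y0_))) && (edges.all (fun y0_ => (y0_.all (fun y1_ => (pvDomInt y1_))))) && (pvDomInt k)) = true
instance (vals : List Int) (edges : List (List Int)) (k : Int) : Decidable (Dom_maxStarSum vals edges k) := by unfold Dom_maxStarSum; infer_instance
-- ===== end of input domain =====

-- B computes each center's star sum independently (sort its neighbor values descending, add the
-- positive ones among the first k) instead of A's global sweep over all nodes sorted by value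
-- with shared counter/partial-sum arrays; same results, a per-node instead of a global algorithm.

-- ===== PORT A =====
-- g[x].append(y)  (shared by both ports: Python list index/assignment semantics)
def pvAppendAt (g : List (List Int)) (x y : Int) : List (List Int) :=
  PySem.List.pySetD g x ((PySem.List.pyGetD g x []) ++ [y])

-- for x, y in edges: g[x].append(y); g[y].append(x)
def pvBuildA (g0 : List (List Int)) (edges : List (List Int)) : List (List Int) :=
  edges.foldl (fun g e =>
    pvAppendAt (pvAppendAt g (PySem.List.pyGetD e 0 0) (PySem.List.pyGetD e 1 0))
      (PySem.List.pyGetD e 1 0) (PySem.List.pyGetD e 0 0)) g0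

-- body of 'for ch in g[idx]': state (ct, sums, ret)
def pvStepA (k v : Int) (st : List Int × List Int × Int) (ch : Int) :
    List Int × List Int × Int :=
  if PySem.List.pyGetD st.1 ch 0 < k then
    let s := PySem.List.pyGetD st.2.1 ch 0 + v
    (PySem.List.pySetD st.1 ch (PySem.List.pyGetD st.1 ch 0 + 1),
     PySem.List.pySetD st.2.1 ch s,
     max st.2.2 s)
  else st

-- 'for idx in ss: if vals[idx] <= 0: break; for ch in g[idx]: ...'
def pvOuterA (vals : List Int) (g : List (List Int)) (k : Int) :
    List Int → List Int × List Int × Int → Int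
  | [], st => st.2.2
  | idx :: rest, st =>
    if PySem.List.pyGetD vals idx 0 ≤ 0 then st.2.2
    else pvOuterA vals g k rest
      ((PySem.List.pyGetD g idx []).foldl (pvStepA k (PySem.List.pyGetD vals idx 0)) st)

def maxStarSum (vals : List Int) (edges : List (List Int)) (k : Int) : Int :=
  let N := vals.length
  let g := pvBuildA (List.replicate N []) edges
  let ss := PySem.List.sorted (PySem.List.pyRange 0 (N : Int) 1)
    (fun x => -(PySem.List.pyGetD vals x 0)) false
  pvOuterA vals g k ss
    (List.replicate N 0, vals, (PySem.List.max? vals (fun x => x)).getD 0)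

-- ===== PORT B =====
-- for x, y in edges: g[x].append(vals[y]); g[y].append(vals[x])   (neighbor VALUES per node)
def pvBuildB (vals : List Int) (g0 : List (List Int)) (edges : List (List Int)) :
    List (List Int) :=
  edges.foldl (fun g e =>
    pvAppendAt
      (pvAppendAt g (PySem.List.pyGetD e 0 0)
        (PySem.List.pyGetD vals (PySem.List.pyGetD e 1 0) 0))
      (PySem.List.pyGetD e 1 0) (PySem.List.pyGetD vals (PySem.List.pyGetD e 0 0) 0)) g0

-- 'for v in lst: if v <= 0: break; s += v'
def pvAddPos (s : Int) : List Int → Int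
  | [] => s
  | v :: rest => if v ≤ 0 then s else pvAddPos (s + v) rest

def maxStarSum_alt (vals : List Int) (edges : List (List Int)) (k : Int) : Int :=
  let n := vals.length
  let g := pvBuildB vals (List.replicate n []) edges
  (PySem.List.pyRange 0 (n : Int) 1).foldl
    (fun best i =>
      max best (pvAddPos (PySem.List.pyGetD vals i 0)
        (PySem.List.slice
          (PySem.List.sorted (PySem.List.pyGetD g i []) (fun v => v) true)
          none (some (max k 0)))))
    ((PySem.List.max? vals (fun x => x)).getD 0)

-- ===== PRECONDITION & SPEC =====
-- Pre_ restricts to the task's natural domain: vals nonempty and every edge a pair of node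
-- indices in [0, len(vals)).  Outside it A raises (ValueError on empty vals or a non-pair row,
-- IndexError on an endpoint out of [-n, n)), except for negative in-range endpoints, where
-- Python's negative-index wraparound reads index i as n+i — there A and B still agree, but such
-- edges are outside the problem's stated node-index domain.
def Pre_maxStarSum (vals : List Int) (edges : List (List Int)) (k : Int) : Prop :=
  vals ≠ [] ∧ ∀ e ∈ edges, e.length = 2 ∧ ∀ z ∈ e, 0 ≤ z ∧ z < (vals.length : Int)
instance (vals : List Int) (edges : List (List Int)) (k : Int) :
    Decidable (Pre_maxStarSum vals edges k) := by unfold Pre_maxStarSum; infer_instance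

def pvWitness_maxStarSum : List Int × List (List Int) × Int :=
  ([3, -1, 2, 4], [[0, 1], [0, 2], [2, 3], [0, 3]], 2)

def Spec_maxStarSum (vals : List Int) (edges : List (List Int)) (k : Int) (out : Int) : Prop := out = maxStarSum_alt vals edges k
instance (vals : List Int) (edges : List (List Int)) (k : Int) (out : Int) : Decidable (Spec_maxStarSum vals edges k out) := by unfold Spec_maxStarSum; infer_instance

-- ===== CLAIM (what is proved, stated in full; the proofs are below) =====
def Claim_equal_maxStarSum : Prop := ∀ (vals : List Int) (edges : List (List Int)) (k : Int), Dom_maxStarSum vals edges k → Pre_maxStarSum vals edges k → Spec_maxStarSum vals edges k (maxStarSum vals edges k)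

-- ===== LEMMAS AND PROOFS =====

-- value of node j (j a node index given as Int)
def pvVal (vals : List Int) (j : Int) : Int := PySem.List.pyGetD vals j 0

-- contribution block of edge e to the adjacency list of node c (A's index lists)
def pvBlock (c : Nat) (e : List Int) : List Int :=
  (if PySem.List.pyGetD e 0 0 = (c : Int) then [PySem.List.pyGetD e 1 0] else []) ++
  (if PySem.List.pyGetD e 1 0 = (c : Int) then [PySem.List.pyGetD e 0 0] else [])

-- stream of values added to center c while processing the node list P in order
def pvStream (vals : List Int) (g : List (List Int)) (P : List Int) (c : Nat) : List Int :=
  P.flatMap (fun idx =>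
    List.replicate ((PySem.List.pyGetD g idx []).count (c : Int)) (pvVal vals idx))

-- loop invariant of A's main sweep: σ c = values already streamed to center c
def pvInv (vals : List Int) (k Mv : Int) (σ : Nat → List Int)
    (st : List Int × List Int × Int) : Prop :=
  st.1.length = vals.length ∧ st.2.1.length = vals.length ∧
  (∀ c, c < vals.length →
    st.1.getD c 0 = ((min k.toNat (σ c).length : Nat) : Int) ∧
    st.2.1.getD c 0 = vals.getD c 0 + ((σ c).take k.toNat).sum ∧
    st.2.1.getD c 0 ≤ st.2.2) ∧
  (st.2.2 = Mv ∨ ∃ c, c < vals.length ∧ st.2.2 = st.2.1.getD c 0) ∧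
  Mv ≤ st.2.2

lemma pvInv_congr {vals : List Int} {k Mv : Int} {σ σ' : Nat → List Int}
    {st : List Int × List Int × Int}
    (h : ∀ c, c < vals.length → σ c = σ' c) (hi : pvInv vals k Mv σ st) :
    pvInv vals k Mv σ' st := by
  obtain ⟨h1, h2, h3, h4, h5⟩ := hi
  exact ⟨h1, h2, fun c hc => by rw [← h c hc]; exact h3 c hc, h4, h5⟩

lemma pvGetD_set {α : Type} {l : List α} {n c : Nat} {w d : α} (hn : n < l.length) :
    (l.set n w).getD c d = if c = n then w else l.getD c d := by
  by_cases h : c = n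
  · subst h; simp [List.getD_eq_getElem?_getD, List.getElem?_set_self hn]
  · simp [List.getD_eq_getElem?_getD, List.getElem?_set_ne (fun hh => h hh.symm), h]

lemma pvStep_inv {vals : List Int} {k Mv : Int} {σ : Nat → List Int}
    {st : List Int × List Int × Int} {v : Int} (hv : 0 < v)
    (cn : Nat) (hlt : cn < vals.length)
    (hi : pvInv vals k Mv σ st) :
    pvInv vals k Mv (fun c => if c = cn then σ c ++ [v] else σ c)
      (pvStepA k v st (cn : Int)) := by
  obtain ⟨ct, sums, ret⟩ := st
  obtain ⟨h1, h2, h3, h4, h5⟩ := hi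
  dsimp only at h1 h2 h3 h4 h5 ⊢
  have hlt1 : cn < ct.length := by rw [h1]; exact hlt
  have hlt2 : cn < sums.length := by rw [h2]; exact hlt
  obtain ⟨hct, hsum, hle⟩ := h3 cn hlt
  unfold pvStepA
  simp only [PySem.List.pyGetD_natCast, PySem.List.pySetD_natCast]
  by_cases hcond : ct.getD cn 0 < k
  · have hLK : (σ cn).length < k.toNat := by rw [hct] at hcond; omega
    rw [if_pos hcond]
    refine ⟨by simpa using h1, by simpa using h2, fun c hc => ?_, ?_,
      le_trans h5 (le_max_left _ _)⟩
    · obtain ⟨hct', hsum', hle'⟩ := h3 c hc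
      dsimp only
      rw [pvGetD_set hlt1, pvGetD_set hlt2]
      by_cases hccn : c = cn
      · subst hccn
        simp only [if_true]
        have hlen1 : (σ c ++ [v]).length = (σ c).length + 1 := by
          simp
        have htk1 : List.take k.toNat (σ c) = σ c :=
          List.take_of_length_le (le_of_lt hLK)
        have htk2 : List.take k.toNat (σ c ++ [v]) = σ c ++ [v] :=
          List.take_of_length_le (by rw [hlen1]; omega)
        refine ⟨?_, ?_, le_max_right _ _⟩
        · rw [hct, hlen1]; push_cast; omega
        · rw [hsum, htk1, htk2, List.sum_append, List.sum_cons, List.sum_nil, add_zero,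
            add_assoc]
      · simp only [if_neg hccn]
        exact ⟨hct', hsum', le_trans hle' (le_max_left _ _)⟩
    · rcases h4 with h4 | ⟨c, hc, hres⟩
      · by_cases hr : sums.getD cn 0 + v ≤ ret
        · rw [max_eq_left hr]; exact Or.inl h4
        · refine Or.inr ⟨cn, hlt, ?_⟩
          rw [pvGetD_set hlt2, if_pos rfl, max_eq_right (le_of_not_ge hr)]
      · by_cases hccn : c = cn
        · subst hccn
          have hlt' : ret < sums.getD c 0 + v := by rw [hres]; omega
          refine Or.inr ⟨c, hc, ?_⟩
          rw [pvGetD_set hlt2, if_pos rfl, max_eq_right (le_of_lt hlt')]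
        · by_cases hr : sums.getD cn 0 + v ≤ ret
          · refine Or.inr ⟨c, hc, ?_⟩
            rw [max_eq_left hr, pvGetD_set hlt2, if_neg hccn]; exact hres
          · refine Or.inr ⟨cn, hlt, ?_⟩
            rw [pvGetD_set hlt2, if_pos rfl, max_eq_right (le_of_not_ge hr)]
  · have hKL : k.toNat = 0 ∨ k.toNat ≤ (σ cn).length := by rw [hct] at hcond; omega
    rw [if_neg hcond]
    refine ⟨h1, h2, fun c hc => ?_, h4, h5⟩
    obtain ⟨hct', hsum', hle'⟩ := h3 c hc
    dsimp only
    by_cases hccn : c = cn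
    · subst hccn
      simp only [if_true]
      have hmin : min k.toNat (σ c ++ [v]).length = min k.toNat (σ c).length := by
        simp only [List.length_append, List.length_cons, List.length_nil]; omega
      have htake : List.take k.toNat (σ c ++ [v]) = List.take k.toNat (σ c) :=
        List.take_append_of_le_length (by omega)
      rw [hmin, htake]
      exact ⟨hct', hsum', hle'⟩
    · simp only [if_neg hccn]
      exact ⟨hct', hsum', hle'⟩

lemma pvFold_inv {vals : List Int} {k Mv : Int} {v : Int} (hv : 0 < v) :
    ∀ (l : List Int) (σ : Nat → List Int) (st : List Int × List Int × Int),
    (∀ ch ∈ l, ∃ cn : Nat, ch = (cn : Int) ∧ cn < vals.length) →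
    pvInv vals k Mv σ st →
    pvInv vals k Mv (fun c => σ c ++ List.replicate (l.count (c : Int)) v)
      (l.foldl (pvStepA k v) st) := by
  intro l
  induction l with
  | nil =>
    intro σ st _ hi
    simp only [List.foldl_nil, List.count_nil, List.replicate_zero, List.append_nil]
    exact hi
  | cons ch t ih =>
    intro σ st hmem hi
    obtain ⟨cn, rfl, hlt⟩ := hmem ch (List.mem_cons_self)
    have h1 := pvStep_inv hv cn hlt hi
    have h2 := ih _ _ (fun x hx => hmem x (List.mem_cons_of_mem _ hx)) h1
    rw [List.foldl_cons]
    refine pvInv_congr (fun c hc => ?_) h2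
    by_cases hccn : c = cn
    · subst hccn
      simp only [if_true, List.count_cons, beq_self_eq_true, List.append_assoc]
      rw [List.replicate_succ, List.singleton_append]
    · have hne : ((cn : Int) == (c : Int)) = false := by
        simp only [beq_eq_false_iff_ne, ne_eq, Int.natCast_inj]
        exact fun hh => hccn hh.symm
      simp [List.count_cons, hne, hccn]

lemma pvOuter_inv {vals : List Int} {g : List (List Int)} {k Mv : Int}
    (hg : ∀ i : Int, ∀ ch ∈ PySem.List.pyGetD g i [], ∃ cn : Nat, ch = (cn : Int) ∧ cn < vals.length) :
    ∀ (rest : List Int) (σ : Nat → List Int) (st : List Int × List Int × Int),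
    pvInv vals k Mv σ st →
    ∃ st', pvInv vals k Mv
        (fun c => σ c ++ pvStream vals g
          (rest.takeWhile (fun x => !decide (PySem.List.pyGetD vals x 0 ≤ 0))) c) st' ∧
      pvOuterA vals g k rest st = st'.2.2 := by
  intro rest
  induction rest with
  | nil =>
    intro σ st hi
    refine ⟨st, ?_, rfl⟩
    refine pvInv_congr (fun c hc => ?_) hi
    simp [pvStream]
  | cons idx t ih =>
    intro σ st hi
    rw [pvOuterA]
    by_cases hpos : PySem.List.pyGetD vals idx 0 ≤ 0
    · rw [if_pos hpos]
      refine ⟨st, ?_, rfl⟩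
      refine pvInv_congr (fun c hc => ?_) hi
      rw [List.takeWhile_cons]
      simp [hpos, pvStream]
    · rw [if_neg hpos]
      have hv : 0 < PySem.List.pyGetD vals idx 0 := lt_of_not_ge hpos
      have h1 := pvFold_inv hv (PySem.List.pyGetD g idx []) σ st (hg idx) hi
      obtain ⟨st', hinv', heq⟩ := ih _ _ h1
      refine ⟨st', ?_, heq⟩
      refine pvInv_congr (fun c hc => ?_) hinv'
      rw [List.takeWhile_cons]
      simp only [hpos, decide_false, Bool.not_false, if_true]
      simp only [pvStream, pvVal, List.flatMap_cons, List.append_assoc]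

-- adjacency-building characterization (shared by both ports)
lemma pvAppendAt_getD {g : List (List Int)} {xn : Nat} {y : Int} (hx : xn < g.length) :
    (pvAppendAt g (xn : Int) y).length = g.length ∧
    ∀ c, (pvAppendAt g (xn : Int) y).getD c [] =
      if c = xn then g.getD c [] ++ [y] else g.getD c [] := by
  unfold pvAppendAt
  simp only [PySem.List.pySetD_natCast, PySem.List.pyGetD_natCast]
  refine ⟨List.length_set, fun c => ?_⟩
  rw [pvGetD_set (w := g.getD xn [] ++ [y]) (d := ([] : List Int)) hx]
  by_cases h : c = xn
  · subst h; simp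
  · simp [h]

lemma pvBuildA_char {vals : List Int} {edges : List (List Int)}
    (hpre : ∀ e ∈ edges, e.length = 2 ∧ ∀ z ∈ e, 0 ≤ z ∧ z < (vals.length : Int)) :
    ∀ g0 : List (List Int), g0.length = vals.length →
    (pvBuildA g0 edges).length = vals.length ∧
    ∀ c, (pvBuildA g0 edges).getD c [] = g0.getD c [] ++ edges.flatMap (pvBlock c) := by
  induction edges with
  | nil => intro g0 hg0; exact ⟨hg0, fun c => by simp [pvBuildA]⟩
  | cons e es ih =>
    intro g0 hg0
    obtain ⟨he2, hezb⟩ := hpre e (List.mem_cons_self)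
    obtain ⟨x, y, rfl⟩ := List.length_eq_two.mp he2
    obtain ⟨hx0, hxN⟩ := hezb x (by simp)
    obtain ⟨hy0, hyN⟩ := hezb y (by simp)
    obtain ⟨xn, rfl, hxn⟩ : ∃ xn : Nat, x = (xn : Int) ∧ xn < vals.length :=
      ⟨x.toNat, (Int.toNat_of_nonneg hx0).symm, by omega⟩
    obtain ⟨yn, rfl, hyn⟩ : ∃ yn : Nat, y = (yn : Int) ∧ yn < vals.length :=
      ⟨y.toNat, (Int.toNat_of_nonneg hy0).symm, by omega⟩
    have hx : PySem.List.pyGetD ([(xn : Int), (yn : Int)] : List Int) 0 0 = (xn : Int) := rfl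
    have hy : PySem.List.pyGetD ([(xn : Int), (yn : Int)] : List Int) 1 0 = (yn : Int) := rfl
    have step : pvBuildA g0 ([(xn : Int), (yn : Int)] :: es) =
        pvBuildA (pvAppendAt (pvAppendAt g0 (xn : Int) (yn : Int)) (yn : Int) (xn : Int)) es := by
      simp only [pvBuildA, List.foldl_cons, hx, hy]
    have A1 := pvAppendAt_getD (g := g0) (xn := xn) (y := (yn : Int)) (by omega)
    have A2 := pvAppendAt_getD (g := pvAppendAt g0 (xn : Int) (yn : Int)) (xn := yn)
      (y := (xn : Int)) (by rw [A1.1]; omega)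
    have hglen : (pvAppendAt (pvAppendAt g0 (xn : Int) (yn : Int)) (yn : Int) (xn : Int)).length
        = vals.length := by rw [A2.1, A1.1, hg0]
    obtain ⟨ihl, ihc⟩ := ih (fun e' he' => hpre e' (List.mem_cons_of_mem _ he')) _ hglen
    rw [step]
    refine ⟨ihl, fun c => ?_⟩
    rw [ihc c, List.flatMap_cons, ← List.append_assoc]
    congr 1
    rw [A2.2 c, A1.2 c]
    unfold pvBlock
    rw [hx, hy]
    simp only [Int.natCast_inj]
    by_cases hcx : c = xn <;> by_cases hcy : c = yn
    · subst hcx; subst hcy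
      simp [List.append_assoc]
    · subst hcx
      simp [hcy, Ne.symm hcy]
    · subst hcy
      simp [hcx, Ne.symm hcx]
    · simp [hcx, hcy, Ne.symm hcx, Ne.symm hcy]

lemma pvBuildB_char {vals : List Int} {edges : List (List Int)}
    (hpre : ∀ e ∈ edges, e.length = 2 ∧ ∀ z ∈ e, 0 ≤ z ∧ z < (vals.length : Int)) :
    ∀ g0 : List (List Int), g0.length = vals.length →
    (pvBuildB vals g0 edges).length = vals.length ∧
    ∀ c, (pvBuildB vals g0 edges).getD c [] =
      g0.getD c [] ++ (edges.flatMap (pvBlock c)).map (pvVal vals) := by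
  induction edges with
  | nil => intro g0 hg0; exact ⟨hg0, fun c => by simp [pvBuildB]⟩
  | cons e es ih =>
    intro g0 hg0
    obtain ⟨he2, hezb⟩ := hpre e (List.mem_cons_self)
    obtain ⟨x, y, rfl⟩ := List.length_eq_two.mp he2
    obtain ⟨hx0, hxN⟩ := hezb x (by simp)
    obtain ⟨hy0, hyN⟩ := hezb y (by simp)
    obtain ⟨xn, rfl, hxn⟩ : ∃ xn : Nat, x = (xn : Int) ∧ xn < vals.length :=
      ⟨x.toNat, (Int.toNat_of_nonneg hx0).symm, by omega⟩
    obtain ⟨yn, rfl, hyn⟩ : ∃ yn : Nat, y = (yn : Int) ∧ yn < vals.length :=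
      ⟨y.toNat, (Int.toNat_of_nonneg hy0).symm, by omega⟩
    have hx : PySem.List.pyGetD ([(xn : Int), (yn : Int)] : List Int) 0 0 = (xn : Int) := rfl
    have hy : PySem.List.pyGetD ([(xn : Int), (yn : Int)] : List Int) 1 0 = (yn : Int) := rfl
    have step : pvBuildB vals g0 ([(xn : Int), (yn : Int)] :: es) =
        pvBuildB vals (pvAppendAt (pvAppendAt g0 (xn : Int) (pvVal vals (yn : Int)))
          (yn : Int) (pvVal vals (xn : Int))) es := by
      simp only [pvBuildB, List.foldl_cons, hx, hy, pvVal]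
    have A1 := pvAppendAt_getD (g := g0) (xn := xn) (y := pvVal vals (yn : Int)) (by omega)
    have A2 := pvAppendAt_getD (g := pvAppendAt g0 (xn : Int) (pvVal vals (yn : Int)))
      (xn := yn) (y := pvVal vals (xn : Int)) (by rw [A1.1]; omega)
    have hglen : (pvAppendAt (pvAppendAt g0 (xn : Int) (pvVal vals (yn : Int))) (yn : Int)
        (pvVal vals (xn : Int))).length = vals.length := by rw [A2.1, A1.1, hg0]
    obtain ⟨ihl, ihc⟩ := ih (fun e' he' => hpre e' (List.mem_cons_of_mem _ he')) _ hglen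
    rw [step]
    refine ⟨ihl, fun c => ?_⟩
    rw [ihc c, List.flatMap_cons, List.map_append, ← List.append_assoc]
    congr 1
    rw [A2.2 c, A1.2 c]
    unfold pvBlock
    rw [hx, hy]
    simp only [Int.natCast_inj]
    by_cases hcx : c = xn <;> by_cases hcy : c = yn
    · subst hcx; subst hcy
      simp [List.append_assoc]
    · subst hcx
      simp [hcy, Ne.symm hcy]
    · subst hcy
      simp [hcx, Ne.symm hcx]
    · simp [hcx, hcy, Ne.symm hcx, Ne.symm hcy]

lemma pvBlock_count_symm (e : List Int) (c d : Nat) :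
    (pvBlock c e).count (d : Int) = (pvBlock d e).count (c : Int) := by
  unfold pvBlock
  split_ifs <;> simp_all

lemma pvBlock_mem {vals : List Int} {e : List Int}
    (he : e.length = 2 ∧ ∀ z ∈ e, 0 ≤ z ∧ z < (vals.length : Int)) (c : Nat) :
    ∀ z ∈ pvBlock c e, ∃ cn : Nat, z = (cn : Int) ∧ cn < vals.length := by
  intro z hz
  obtain ⟨he2, hezb⟩ := he
  obtain ⟨x, y, rfl⟩ := List.length_eq_two.mp he2
  obtain ⟨hx0, hxN⟩ := hezb x (by simp)
  obtain ⟨hy0, hyN⟩ := hezb y (by simp)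
  have hx : PySem.List.pyGetD ([x, y] : List Int) 0 0 = x := rfl
  have hy : PySem.List.pyGetD ([x, y] : List Int) 1 0 = y := rfl
  unfold pvBlock at hz
  rw [hx, hy] at hz
  have hzxy : z = x ∨ z = y := by
    rcases List.mem_append.mp hz with h | h <;> split_ifs at h <;>
      simp_all
  rcases hzxy with rfl | rfl
  · exact ⟨z.toNat, (Int.toNat_of_nonneg hx0).symm, by omega⟩
  · exact ⟨z.toNat, (Int.toNat_of_nonneg hy0).symm, by omega⟩

lemma pvCount_flatMap_replicate (n : Int → Nat) (z : Int) :
    ∀ L : List Int, L.Nodup →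
    (L.flatMap (fun i => List.replicate (n i) i)).count z = if z ∈ L then n z else 0 := by
  intro L hL
  induction L with
  | nil => simp
  | cons i L ih =>
    rw [List.flatMap_cons, List.count_append, List.count_replicate,
      ih (List.Nodup.of_cons hL)]
    rcases List.nodup_cons.mp hL with ⟨hni, _⟩
    by_cases h : z = i
    · subst h; simp [hni]
    · simp [Ne.symm h, h, List.mem_cons]

-- any list of in-range indices is, up to permutation, the range with multiplicities
lemma pvPerm_decomp {N : Nat} (l : List Int)
    (hl : ∀ z ∈ l, ∃ cn : Nat, z = (cn : Int) ∧ cn < N) :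
    l.Perm ((PySem.List.pyRange 0 (N : Int) 1).flatMap
      (fun i => List.replicate (l.count i) i)) := by
  rw [List.perm_iff_count]
  intro z
  rw [pvCount_flatMap_replicate _ z _ (PySem.List.nodup_pyRange_one 0 (N : Int))]
  by_cases h : z ∈ PySem.List.pyRange 0 (N : Int) 1
  · simp [h]
  · simp only [h, if_false]
    rw [List.count_eq_zero]
    intro hz
    obtain ⟨cn, hzc, hcn⟩ := hl z hz
    refine h (PySem.List.mem_pyRange_one.mpr ⟨?_, ?_⟩)
    · rw [hzc]; exact Int.natCast_nonneg cn
    · rw [hzc]; exact_mod_cast hcn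

lemma pvAddPos_posList {P : List Int} (hP : ∀ z ∈ P, 0 < z) :
    ∀ {s : Int} {B : List Int}, pvAddPos s (P ++ B) = pvAddPos (s + P.sum) B := by
  induction P with
  | nil => intro s B; simp
  | cons a t ih =>
    intro s B
    have ha : ¬ a ≤ 0 := not_le.mpr (hP a (List.mem_cons_self))
    rw [List.cons_append]
    show pvAddPos s (a :: (t ++ B)) = _
    rw [pvAddPos, if_neg ha, ih (fun z hz => hP z (List.mem_cons_of_mem _ hz))]
    rw [List.sum_cons, ← add_assoc]

lemma pvAddPos_nonpos {s : Int} {B : List Int} (hB : ∀ z ∈ B, z ≤ 0) :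
    pvAddPos s B = s := by
  cases B with
  | nil => rfl
  | cons b t => rw [pvAddPos, if_pos (hB b (List.mem_cons_self))]

lemma pvAddPos_take {s : Int} {K : Nat} {P Q : List Int}
    (hP : ∀ z ∈ P, 0 < z) (hQ : ∀ z ∈ Q, z ≤ 0) :
    pvAddPos s (List.take K (P ++ Q)) = s + (P.take K).sum := by
  rw [List.take_append]
  rw [pvAddPos_posList (fun z hz => hP z (List.mem_of_mem_take hz))]
  exact pvAddPos_nonpos (fun z hz => hQ z (List.mem_of_mem_take hz))

lemma pvFoldl_max_le {α : Type} {l : List α} {f : α → Int} {a r : Int}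
    (ha : a ≤ r) (hf : ∀ x ∈ l, f x ≤ r) :
    l.foldl (fun acc x => max acc (f x)) a ≤ r := by
  induction l generalizing a with
  | nil => exact ha
  | cons x t ih =>
    exact ih (max_le ha (hf x (List.mem_cons_self)))
      (fun y hy => hf y (List.mem_cons_of_mem _ hy))

lemma pvStream_mem {vals : List Int} {g : List (List Int)} {P : List Int} {c : Nat} {z : Int}
    (hz : z ∈ pvStream vals g P c) : ∃ idx ∈ P, z = pvVal vals idx := by
  unfold pvStream at hz
  obtain ⟨idx, hidx, hzz⟩ := List.mem_flatMap.mp hz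
  exact ⟨idx, hidx, List.eq_of_mem_replicate hzz⟩

lemma pvStream_pairwise {vals : List Int} {g : List (List Int)} {c : Nat} {P : List Int}
    (hp : P.Pairwise (fun a b => pvVal vals b ≤ pvVal vals a)) :
    (pvStream vals g P c).Pairwise (fun a b : Int => b ≤ a) := by
  induction P with
  | nil => simp [pvStream]
  | cons idx t ih =>
    obtain ⟨hhead, htail⟩ := List.pairwise_cons.mp hp
    rw [pvStream, List.flatMap_cons, List.pairwise_append]
    refine ⟨List.pairwise_replicate.mpr (Or.inr (le_refl _)), ih htail, ?_⟩
    intro a ha b hb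
    have ha' := List.eq_of_mem_replicate ha
    obtain ⟨idx', hidx', rfl⟩ := pvStream_mem (show b ∈ pvStream vals g t c from hb)
    subst ha'
    exact hhead idx' hidx'

lemma pvDropWhile_nonpos {vals : List Int} :
    ∀ {l : List Int}, l.Pairwise (fun a b => pvVal vals b ≤ pvVal vals a) →
    ∀ x ∈ l.dropWhile (fun x => !decide (PySem.List.pyGetD vals x 0 ≤ 0)),
      PySem.List.pyGetD vals x 0 ≤ 0 := by
  intro l
  induction l with
  | nil => intro _ x hx; simp at hx
  | cons a t ih =>
    intro hp x hx
    obtain ⟨hhead, htail⟩ := List.pairwise_cons.mp hp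
    rw [List.dropWhile_cons] at hx
    by_cases hpa : PySem.List.pyGetD vals a 0 ≤ 0
    · simp only [hpa, decide_true, Bool.not_true, if_neg Bool.false_ne_true] at hx
      rcases List.mem_cons.mp hx with rfl | hx'
      · exact hpa
      · exact le_trans (hhead x hx') hpa
    · simp only [hpa, decide_false, Bool.not_false, if_true] at hx
      exact ih htail x hx

-- the per-center equality: B's star sum for center c = A's final sums[c]
lemma pvCenter_eq {vals : List Int} {g : List (List Int)} {k : Int}
    (ss : List Int) (hperm : ss.Perm (PySem.List.pyRange 0 (vals.length : Int) 1))
    (hpair : ss.Pairwise (fun a b => pvVal vals b ≤ pvVal vals a))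
    (hrange : ∀ c, ∀ z ∈ g.getD c [], ∃ cn : Nat, z = (cn : Int) ∧ cn < vals.length)
    (hsymm : ∀ c d, c < vals.length → d < vals.length →
      (g.getD c []).count (d : Int) = (g.getD d []).count (c : Int))
    (c : Nat) (hc : c < vals.length) :
    pvAddPos (vals.getD c 0)
      (PySem.List.slice
        (PySem.List.sorted ((g.getD c []).map (pvVal vals)) (fun v => v) true)
        none (some (max k 0))) =
    vals.getD c 0 +
      ((pvStream vals g
        (ss.takeWhile (fun x => !decide (PySem.List.pyGetD vals x 0 ≤ 0))) c).take k.toNat).sum := by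
  have hc' : (c : Int) < (vals.length : Int) := by exact_mod_cast hc
  set pred : Int → Bool := fun x => !decide (PySem.List.pyGetD vals x 0 ≤ 0) with hpred
  set p : Int → Bool := fun z => decide (0 < z) with hp
  set vlist : List Int := (g.getD c []).map (pvVal vals) with hvl
  set P : List Int := pvStream vals g (ss.takeWhile pred) c with hP
  set Q : List Int := PySem.List.sorted (vlist.filter (fun z => !p z)) (fun v => v) true with hQ
  have hPpos : ∀ z ∈ P, 0 < z := by
    intro z hz
    obtain ⟨idx, hidx, rfl⟩ := pvStream_mem hz
    have h1 := List.mem_takeWhile_imp hidx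
    simp only [hpred, Bool.not_eq_true', decide_eq_false_iff_not, not_le] at h1
    exact h1
  have hQnp : ∀ z ∈ Q, z ≤ 0 := by
    intro z hz
    have hz' := (PySem.List.mem_sorted _ _ _ _).mp hz
    have h1 := List.of_mem_filter hz'
    simp only [hp, Bool.not_eq_true', decide_eq_false_iff_not, not_lt] at h1
    exact h1
  -- P is exactly the positive part of the full stream along ss
  have hfilter : (pvStream vals g ss c).filter p = P := by
    conv_lhs => rw [← List.takeWhile_append_dropWhile (p := pred) (l := ss)]
    rw [show pvStream vals g (ss.takeWhile pred ++ ss.dropWhile pred) c =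
        pvStream vals g (ss.takeWhile pred) c ++ pvStream vals g (ss.dropWhile pred) c by
      unfold pvStream; rw [List.flatMap_append]]
    rw [List.filter_append]
    have h1 : P.filter p = P := List.filter_eq_self.mpr (fun z hz => by
      simp only [hp, decide_eq_true_eq]; exact hPpos z hz)
    have h2 : (pvStream vals g (ss.dropWhile pred) c).filter p = [] := by
      rw [List.filter_eq_nil_iff]
      intro z hz
      obtain ⟨idx, hidx, rfl⟩ := pvStream_mem hz
      have h3 := pvDropWhile_nonpos hpair idx hidx
      simp only [hp, decide_eq_true_eq, not_lt]
      exact h3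
    rw [h1, h2, List.append_nil]
  -- the full stream is a permutation of vlist
  have hcong : pvStream vals g (PySem.List.pyRange 0 (vals.length : Int) 1) c =
      (PySem.List.pyRange 0 (vals.length : Int) 1).flatMap
        (fun i => List.replicate ((g.getD c []).count i) (pvVal vals i)) := by
    unfold pvStream
    refine List.flatMap_congr (fun i hi => ?_)
    obtain ⟨hi0, hiN⟩ := PySem.List.mem_pyRange_one.mp hi
    obtain ⟨inn, rfl, hinn⟩ : ∃ inn : Nat, i = (inn : Int) ∧ inn < vals.length :=
      ⟨i.toNat, (Int.toNat_of_nonneg hi0).symm, by omega⟩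
    rw [PySem.List.pyGetD_natCast, hsymm inn c hinn hc]
  have hvperm : vlist.Perm (pvStream vals g ss c) := by
    have h0 := (pvPerm_decomp (N := vals.length) (g.getD c []) (hrange c)).map (pvVal vals)
    rw [List.map_flatMap] at h0
    simp only [List.map_replicate] at h0
    rw [← hvl, ← hcong] at h0
    exact h0.trans ((hperm.flatMap (fun a _ => List.Perm.refl _)).symm)
  have hPQ : (P ++ Q).Perm vlist := by
    have e1 : P.Perm (vlist.filter p) := by
      rw [← hfilter]
      exact (hvperm.filter p).symm
    have e2 : Q.Perm (vlist.filter (fun z => !p z)) := PySem.List.sorted_perm _ _ _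
    exact (e1.append e2).trans (List.filter_append_perm p vlist)
  have hsortS : (PySem.List.sorted vlist (fun v => v) true).Pairwise (fun a b : Int => b ≤ a) :=
    PySem.List.sorted_pairwise_rev vlist (fun v => v)
  have hsortPQ : (P ++ Q).Pairwise (fun a b : Int => b ≤ a) := by
    rw [List.pairwise_append]
    refine ⟨pvStream_pairwise (List.Pairwise.sublist (List.takeWhile_sublist pred) hpair), ?_, ?_⟩
    · exact PySem.List.sorted_pairwise_rev _ _
    · exact fun a ha b hb => le_trans (hQnp b hb) (le_of_lt (hPpos a ha))
  have hS : PySem.List.sorted vlist (fun v => v) true = P ++ Q :=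
    List.Perm.eq_of_pairwise (fun a b _ _ h1 h2 => le_antisymm h2 h1) hsortS hsortPQ
      ((PySem.List.sorted_perm _ _ _).trans hPQ.symm)
  rw [hvl] at hS
  rw [hS, PySem.List.slice_to _ (le_max_right k 0),
    show (max k 0).toNat = k.toNat by omega]
  exact pvAddPos_take hPpos hQnp

lemma pvFlatMap_block_count (edges : List (List Int)) (c d : Nat) :
    (edges.flatMap (pvBlock c)).count (d : Int) = (edges.flatMap (pvBlock d)).count (c : Int) := by
  induction edges with
  | nil => simp
  | cons e es ih =>
    rw [List.flatMap_cons, List.flatMap_cons, List.count_append, List.count_append, ih,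
      pvBlock_count_symm]

lemma pvReplicate_getD_nil (n c : Nat) :
    (List.replicate n ([] : List Int)).getD c [] = [] := by
  by_cases hcN : c < n
  · exact List.getD_replicate _ hcN
  · rw [List.getD_eq_default]
    simp only [List.length_replicate]
    omega

-- ===== VERDICT (by name: the statement is the Claim_ definition above) =====
theorem maxStarSum_spec : Claim_equal_maxStarSum := by
  intro vals edges k _ hPre
  obtain ⟨hne, hpre⟩ := hPre
  unfold Spec_maxStarSum maxStarSum maxStarSum_alt
  set Mv := (PySem.List.max? vals (fun x => x)).getD 0 with hMvdef
  have hMv : ∀ y ∈ vals, y ≤ Mv := by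
    cases vals with
    | nil => exact absurd rfl hne
    | cons v0 vt =>
      rw [hMvdef, PySem.List.max?_id_cons, Option.getD_some]
      intro y hy
      rcases List.mem_cons.mp hy with rfl | hy'
      · exact (PySem.List.le_foldl_max vt y).1
      · exact (PySem.List.le_foldl_max vt v0).2 y hy'
  have hbA := pvBuildA_char (vals := vals) hpre (List.replicate vals.length [])
    (by simp)
  set gA := pvBuildA (List.replicate vals.length []) edges with hgAdef
  have hgArep : ∀ c : Nat, gA.getD c [] = edges.flatMap (pvBlock c) := by
    intro c
    rw [hbA.2 c, pvReplicate_getD_nil, List.nil_append]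
  have hbB := pvBuildB_char (vals := vals) hpre (List.replicate vals.length [])
    (by simp)
  set gB := pvBuildB vals (List.replicate vals.length []) edges with hgBdef
  have hgBrep : ∀ c : Nat, gB.getD c [] = (gA.getD c []).map (pvVal vals) := by
    intro c
    rw [hbB.2 c, pvReplicate_getD_nil, List.nil_append, hgArep c]
  have hrange : ∀ c : Nat, ∀ z ∈ gA.getD c [], ∃ cn : Nat, z = (cn : Int) ∧ cn < vals.length := by
    intro c z hz
    rw [hgArep c] at hz
    obtain ⟨e, he, hze⟩ := List.mem_flatMap.mp hz
    exact pvBlock_mem (hpre e he) c z hze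
  have hsymm : ∀ c d : Nat, c < vals.length → d < vals.length →
      (gA.getD c []).count (d : Int) = (gA.getD d []).count (c : Int) := by
    intro c d _ _
    rw [hgArep c, hgArep d]
    exact pvFlatMap_block_count edges c d
  have hg : ∀ i : Int, ∀ ch ∈ PySem.List.pyGetD gA i [],
      ∃ cn : Nat, ch = (cn : Int) ∧ cn < vals.length := by
    intro i ch hch
    by_cases hin : PySem.Raise.InRange gA.length i
    · have hmem := PySem.List.pyGetD_mem gA ([] : List Int) hin
      obtain ⟨j, hj, hjl⟩ := List.mem_iff_getElem.mp hmem
      have : PySem.List.pyGetD gA i [] = gA.getD j [] := by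
        rw [← hjl, List.getD_eq_getElem _ _ hj]
      rw [this] at hch
      exact hrange j ch hch
    · rw [PySem.List.pyGetD_of_none gA i ([] : List Int)
        ((PySem.List.pyGet?_eq_none_iff gA i).mpr hin)] at hch
      simp at hch
  set ss := PySem.List.sorted (PySem.List.pyRange 0 (vals.length : Int) 1)
    (fun x => -(PySem.List.pyGetD vals x 0)) false with hssdef
  have hperm : ss.Perm (PySem.List.pyRange 0 (vals.length : Int) 1) :=
    PySem.List.sorted_perm _ _ _
  have hpair : ss.Pairwise (fun a b => pvVal vals b ≤ pvVal vals a) := by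
    have h := PySem.List.sorted_pairwise (PySem.List.pyRange 0 (vals.length : Int) 1)
      (fun x => -(PySem.List.pyGetD vals x 0))
    rw [← hssdef] at h
    exact h.imp (fun hab => by unfold pvVal; omega)
  have hInit : pvInv vals k Mv (fun _ => [])
      (List.replicate vals.length 0, vals, Mv) := by
    refine ⟨by simp, rfl, fun c hc => ?_, Or.inl rfl, le_refl _⟩
    refine ⟨?_, ?_, ?_⟩
    · dsimp only
      rw [List.getD_replicate _ hc]
      simp
    · dsimp only
      simp
    · dsimp only
      refine hMv _ ?_
      rw [List.getD_eq_getElem _ _ hc]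
      exact List.getElem_mem hc
  obtain ⟨st', hinv', heq⟩ := pvOuter_inv (k := k) (Mv := Mv) hg ss (fun _ => []) _ hInit
  have hinv2 := pvInv_congr (fun c hc => List.nil_append _) hinv'
  obtain ⟨hl1, hl2, h3, h4, h5⟩ := hinv2
  rw [heq]
  dsimp only
  have hNN : ((vals.length : Int) - 0).toNat = vals.length := by omega
  rw [PySem.List.pyRange_one, hNN, List.foldl_map]
  simp only [zero_add]
  set F : Nat → Int := fun c => vals.getD c 0 +
    ((pvStream vals gA
      (ss.takeWhile (fun x => !decide (PySem.List.pyGetD vals x 0 ≤ 0))) c).take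
        k.toNat).sum with hFdef
  have hcongrB : (List.range vals.length).foldl
      (fun (best : Int) (y : Nat) =>
        max best (pvAddPos (PySem.List.pyGetD vals (y : Int) 0)
          (PySem.List.slice
            (PySem.List.sorted (PySem.List.pyGetD gB (y : Int) []) (fun v => v) true)
            none (some (max k 0))))) Mv =
      (List.range vals.length).foldl (fun a c => max a (F c)) Mv := by
    refine PySem.List.foldl_congr_mem _ _ _ _ (fun acc x hx => ?_)
    have hxN : x < vals.length := List.mem_range.mp hx
    rw [PySem.List.pyGetD_natCast, PySem.List.pyGetD_natCast, hgBrep x, hFdef]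
    exact congrArg (max acc)
      (pvCenter_eq ss hperm hpair hrange hsymm x hxN)
  rw [hcongrB]
  have hFc : ∀ c : Nat, F c = vals.getD c 0 +
      ((pvStream vals gA
        (ss.takeWhile (fun x => !decide (PySem.List.pyGetD vals x 0 ≤ 0))) c).take
          k.toNat).sum := fun c => rfl
  have hle1 : st'.2.2 ≤ (List.range vals.length).foldl (fun a c => max a (F c)) Mv := by
    rcases h4 with h4 | ⟨c, hcN, h4⟩
    · rw [h4]
      exact (PySem.List.le_foldl_max_int _ _ _).1
    · rw [h4, (h3 c hcN).2.1, ← hFc c]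
      exact (PySem.List.le_foldl_max_int _ F Mv).2 c (List.mem_range.mpr hcN)
  have hle2 : (List.range vals.length).foldl (fun a c => max a (F c)) Mv ≤ st'.2.2 := by
    refine pvFoldl_max_le h5 (fun c hcr => ?_)
    have hcN := List.mem_range.mp hcr
    rw [hFc c, ← (h3 c hcN).2.1]
    exact (h3 c hcN).2.2
  exact le_antisymm hle1 hle2
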